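-- pv_equiv track=rewrite | github.com/zzyyyl/VideoDownloader | strange.py | add_to_16
-- ===== SOURCE A (Python) =====
-- def add_to_16(value):
--     if type(value) == str:
--         x00 = '\x00'
--     elif type(value) == bytes:
--         x00 = b'\x00'
--     else:
--         x00 = '\x00'
--
--     while len(value) % 16 != 0: value += x00
--     return value
-- ===== SOURCE B (Python) =====
-- def add_to_16(value):
--     if type(value) == str:
--         x00 = '\x00'
--     elif type(value) == bytes:
--         x00 = b'\x00'
--     else:
--         x00 = '\x00'
--     pad = (-len(value)) % 16
--     return value + x00 * pad
-- ===== Notes on version B (the rewrite author's own statement) =====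
-- stated objective: simpler
-- what changed: Replaces the incremental append-one-NUL-at-a-time while-loop with a closed-form padding length (-len(value)) % 16 and a single concatenation.
import Mathlib
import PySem

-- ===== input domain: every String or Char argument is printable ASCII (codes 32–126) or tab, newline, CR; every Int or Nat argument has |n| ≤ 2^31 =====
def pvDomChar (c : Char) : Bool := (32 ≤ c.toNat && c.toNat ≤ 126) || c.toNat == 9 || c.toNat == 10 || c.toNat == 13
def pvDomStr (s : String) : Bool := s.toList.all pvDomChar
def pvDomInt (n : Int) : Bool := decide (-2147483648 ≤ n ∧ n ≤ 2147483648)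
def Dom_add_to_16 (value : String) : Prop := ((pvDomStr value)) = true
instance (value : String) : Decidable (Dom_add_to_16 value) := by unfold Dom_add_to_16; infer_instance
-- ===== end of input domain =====

-- B pads with a closed-form (-len) % 16 and one concatenation instead of A's append-one-NUL while-loop (objective: simpler).

-- ===== PORT A =====
-- A's while-loop: while len(value) % 16 != 0: value += '\x00'   (str case of A's type dispatch; on the List Char side)
def add_to_16_loop (cs : List Char) : List Char :=
  if cs.length % 16 ≠ 0 then add_to_16_loop (cs ++ ['\x00']) else cs
termination_by (16 - cs.length % 16) % 16
decreasing_by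
  rename_i h
  simp only [List.length_append, List.length_singleton]
  omega

def add_to_16 (value : String) : String :=
  String.ofList (add_to_16_loop value.toList)

-- ===== PORT B =====
-- pad = (-len(value)) % 16; return value + '\x00' * pad
def add_to_16_alt (value : String) : String :=
  let pad : Int := PySem.Int.mod (-(value.toList.length : Int)) 16
  String.ofList (value.toList ++ PySem.List.pyRepeat ['\x00'] pad)

-- ===== PRECONDITION & SPEC =====
def Spec_add_to_16 (value : String) (out : String) : Prop := out = add_to_16_alt value
instance (value : String) (out : String) : Decidable (Spec_add_to_16 value out) := by unfold Spec_add_to_16; infer_instance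

-- ===== CLAIM (what is proved, stated in full; the proofs are below) =====
def Claim_equal_add_to_16 : Prop := ∀ (value : String), Dom_add_to_16 value → Spec_add_to_16 value (add_to_16 value)

-- ===== LEMMAS AND PROOFS =====
theorem add_to_16_loop_eq (cs : List Char) :
    add_to_16_loop cs = cs ++ List.replicate ((16 - cs.length % 16) % 16) '\x00' := by
  fun_induction add_to_16_loop cs with
  | case1 cs h ih =>
    rw [ih]
    have : cs ++ ['\x00'] ++ List.replicate ((16 - (cs ++ ['\x00']).length % 16) % 16) '\x00'
         = cs ++ ('\x00' :: List.replicate ((16 - (cs.length + 1) % 16) % 16) '\x00') := by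
      simp [List.append_assoc]
    rw [this]
    congr 1
    rw [← List.replicate_succ]
    congr 1
    omega
  | case2 cs h =>
    simp only [ne_eq, not_not] at h
    simp [h]

theorem add_to_16_spec' (value : String) : add_to_16 value = add_to_16_alt value := by
  unfold add_to_16 add_to_16_alt
  simp only []
  rw [add_to_16_loop_eq, PySem.List.pyRepeat_singleton,
      PySem.Int.mod_eq_emod_of_pos (a := -(value.toList.length : Int)) (by norm_num)]
  have h : ((-(value.toList.length : Int)) % 16).toNat = (16 - value.toList.length % 16) % 16 := by
    omega
  rw [h]

-- ===== VERDICT (by name: the statement is the Claim_ definition above) =====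
theorem add_to_16_spec : Claim_equal_add_to_16 := by
  intro value _
  exact add_to_16_spec' value
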